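-- pv_equiv track=rewrite | github.com/Idotopaz/Afeka-python | Home Work/Task 10/jonathan/switched numbers.py | is_switched_number
-- ===== SOURCE A (Python) =====
-- def is_switched_number(number):
--
--     if number < 10 :
--         return True
--
--     if number % 10 % 2 != number // 10 % 10 % 2:
--         return is_switched_number(number//100)
--     elif number % 10 % 2 != 0 and number // 10 % 10 % 2 == 0:
--         return is_switched_number(number//100)
--     else:
--         return False
-- ===== SOURCE B (Python) =====
-- def is_switched_number(number):
--     while number >= 10:
--         if number % 10 % 2 == number // 10 % 10 % 2:
--             return False
--         number //= 100
--     return True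
-- ===== Notes on version B (the rewrite author's own statement) =====
-- stated objective: simpler
-- what changed: Replaces the recursion-by-100 with an iterative while loop over a single mutated variable and drops the dead elif branch (unreachable because it implies the first condition).
import Mathlib
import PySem

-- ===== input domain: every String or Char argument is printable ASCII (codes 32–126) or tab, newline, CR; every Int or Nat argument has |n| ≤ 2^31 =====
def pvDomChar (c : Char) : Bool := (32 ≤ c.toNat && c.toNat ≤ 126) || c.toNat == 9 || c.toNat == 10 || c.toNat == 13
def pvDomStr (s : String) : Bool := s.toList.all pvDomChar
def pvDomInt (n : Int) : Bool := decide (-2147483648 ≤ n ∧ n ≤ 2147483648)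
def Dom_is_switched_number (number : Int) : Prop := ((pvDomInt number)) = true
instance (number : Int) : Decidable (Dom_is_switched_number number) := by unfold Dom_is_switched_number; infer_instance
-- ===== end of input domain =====

-- B replaces A's recursion-by-100 with an iterative while loop and drops A's dead elif branch; same values everywhere.

-- termination helper used by both ports
theorem pv_dec (n : Int) (h : ¬ n < 10) : (PySem.Int.floordiv n 100).toNat < n.toNat := by
  rw [PySem.Int.floordiv_eq_ediv_of_pos (by norm_num)]
  omega

-- ===== PORT A =====
def is_switched_number (number : Int) : Bool :=
  if number < 10 then true
  else if PySem.Int.mod (PySem.Int.mod number 10) 2 ≠ PySem.Int.mod (PySem.Int.mod (PySem.Int.floordiv number 10) 10) 2 then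
    is_switched_number (PySem.Int.floordiv number 100)
  else if PySem.Int.mod (PySem.Int.mod number 10) 2 ≠ 0 ∧ PySem.Int.mod (PySem.Int.mod (PySem.Int.floordiv number 10) 10) 2 = 0 then
    is_switched_number (PySem.Int.floordiv number 100)
  else false
termination_by number.toNat
decreasing_by all_goals exact pv_dec number (by assumption)

-- ===== PORT B =====
-- transliteration of Source B's while loop: the loop body is one recursive step on the mutated variable
def is_switched_number_alt (number : Int) : Bool :=
  if number ≥ 10 then
    if PySem.Int.mod (PySem.Int.mod number 10) 2 = PySem.Int.mod (PySem.Int.mod (PySem.Int.floordiv number 10) 10) 2 then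
      false
    else
      is_switched_number_alt (PySem.Int.floordiv number 100)
  else true
termination_by number.toNat
decreasing_by exact pv_dec number (by omega)

-- ===== PRECONDITION & SPEC =====
def Spec_is_switched_number (number : Int) (out : Bool) : Prop := out = is_switched_number_alt number
instance (number : Int) (out : Bool) : Decidable (Spec_is_switched_number number out) := by unfold Spec_is_switched_number; infer_instance

-- ===== CLAIM (what is proved, stated in full; the proofs are below) =====
def Claim_equal_is_switched_number : Prop := ∀ (number : Int), Dom_is_switched_number number → Spec_is_switched_number number (is_switched_number number)

-- ===== LEMMAS AND PROOFS =====
theorem pv_eq_all (n : Int) : is_switched_number n = is_switched_number_alt n := by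
  by_cases h : n < 10
  · rw [is_switched_number, is_switched_number_alt]
    simp [h, show ¬ n ≥ 10 by omega]
  · have ih := pv_eq_all (PySem.Int.floordiv n 100)
    rw [is_switched_number, is_switched_number_alt]
    by_cases he : PySem.Int.mod (PySem.Int.mod n 10) 2 = PySem.Int.mod (PySem.Int.mod (PySem.Int.floordiv n 10) 10) 2
    · rw [if_neg h, if_neg (not_not_intro he),
          if_neg (by rintro ⟨h1, h2⟩; exact h1 (he.trans h2)),
          if_pos (show n ≥ 10 by omega), if_pos he]
    · rw [if_neg h, if_pos he, if_pos (show n ≥ 10 by omega), if_neg he, ih]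
termination_by n.toNat
decreasing_by exact pv_dec n h

-- ===== VERDICT (by name: the statement is the Claim_ definition above) =====
theorem is_switched_number_spec : Claim_equal_is_switched_number := by
  intro n _
  exact pv_eq_all n
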